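-- pv_equiv track=rewrite | github.com/heejin42/study_algorithm | programmers/110옮기기.py | solution
-- ===== SOURCE A (Python) =====
-- from collections import deque
--
-- def solution(s):
--     answer = []
--     for cur in s:
--         q = deque()
--         zcnt = 0  # 0의 개수
--         cnt = 0  # "110"이 삽입된 개수
--
--         for i in range(len(cur)):
--             # "110" 추출
--             if len(q) > 1 and cur[i] == '0' and q[-2] == '1' and q[-1] == '1':
--                 q.pop()
--                 q.pop()
--                 cnt += 1
--                 continue
--
--             if cur[i] == '0':
--                 zcnt += 1
--
--             q.append(cur[i])
--
--         new_s = ""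
--         while q:
--             if not zcnt and cnt:
--                 new_s += "110" * cnt
--                 cnt = 0
--
--             if q[0] == '0':
--                 zcnt -= 1
--
--             new_s += q.popleft()
--
--         if cnt:
--             new_s += "110" * cnt
--
--         answer.append(new_s)
--
--     return answer
-- ===== SOURCE B (Python) =====
-- def solution(s):
--     answer = []
--     for cur in s:
--         t = cur
--         while True:
--             i = t.find("110")
--             if i == -1:
--                 break
--             t = t[:i] + t[i+3:]
--         cnt = (len(cur) - len(t)) // 3
--         j = t.rfind('0') + 1
--         answer.append(t[:j] + "110" * cnt + t[j:])
--     return answer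
-- ===== Notes on version B (the rewrite author's own statement) =====
-- stated objective: simpler
-- what changed: Replaces the single-pass deque stack reduction plus counter-driven char-by-char rebuild with repeated find-and-delete of the leftmost "110", a length-arithmetic count, and one rfind-based slice insertion.
import Mathlib
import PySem

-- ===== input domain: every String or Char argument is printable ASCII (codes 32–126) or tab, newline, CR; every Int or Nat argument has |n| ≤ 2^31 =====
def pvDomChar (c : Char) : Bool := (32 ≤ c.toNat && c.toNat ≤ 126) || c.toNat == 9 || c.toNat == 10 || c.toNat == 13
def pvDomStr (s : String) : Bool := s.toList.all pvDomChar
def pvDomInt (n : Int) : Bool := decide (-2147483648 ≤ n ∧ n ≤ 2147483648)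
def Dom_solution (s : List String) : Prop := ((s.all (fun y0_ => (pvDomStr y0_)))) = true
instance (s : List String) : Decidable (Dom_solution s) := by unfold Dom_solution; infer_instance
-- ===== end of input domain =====

-- B replaces A's one-pass deque reduction and counter-driven rebuild by repeated
-- find-and-delete of the leftmost "110", a length-difference count, and one
-- rfind-based slice insertion (objective: simpler; not faster).

-- ===== PORT A =====
-- body of `for i in range(len(cur))`: state (q, zcnt, cnt); iterating over the
-- string's characters in order is the same traversal as indexing i = 0..len-1.
def stepA (st : List Char × Int × Int) (c : Char) : List Char × Int × Int :=
  if st.1.length > 1 ∧ c = '0' ∧ PySem.List.pyGet? st.1 (-2) = some '1' ∧ PySem.List.pyGet? st.1 (-1) = some '1' then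
    (st.1.dropLast.dropLast, st.2.1, st.2.2 + 1)      -- q.pop(); q.pop(); cnt += 1; continue
  else
    (st.1 ++ [c], if c = '0' then st.2.1 + 1 else st.2.1, st.2.2)

-- the `while q:` rebuild loop followed by the trailing `if cnt:` append
def rebuildA : List Char → Int → Int → List Char
  | [], _, cnt => if cnt ≠ 0 then PySem.List.pyRepeat ['1','1','0'] cnt else []
  | a :: q, zcnt, cnt =>
      let pre := if zcnt = 0 ∧ cnt ≠ 0 then PySem.List.pyRepeat ['1','1','0'] cnt else []
      let cnt' := if zcnt = 0 ∧ cnt ≠ 0 then 0 else cnt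
      let z' := if a = '0' then zcnt - 1 else zcnt
      pre ++ a :: rebuildA q z' cnt'

def solution (s : List String) : List String :=
  s.map fun cur =>
    let res := cur.toList.foldl stepA ([], 0, 0)
    String.ofList (rebuildA res.1 res.2.1 res.2.2)

-- ===== PORT B =====
-- `while True: i = t.find("110"); if i == -1: break; t = t[:i] + t[i+3:]`
-- (fuel = t.length is a pure totality guard: each iteration deletes 3 characters,
-- so the loop always breaks before the fuel runs out)
def loopBGo : Nat → List Char → List Char
  | 0, t => t
  | Nat.succ n, t =>
    let i := PySem.Chars.find t ['1','1','0']
    if i = -1 then t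
    else loopBGo n (PySem.List.slice t none (some i) ++ PySem.List.slice t (some (i + 3)) none)

def loopB (t : List Char) : List Char := loopBGo t.length t

def solution_alt (s : List String) : List String :=
  s.map fun cur =>
    let t := loopB cur.toList
    let cnt := PySem.Int.floordiv (cur.toList.length - t.length) 3
    let j := PySem.Chars.rfind t ['0'] + 1
    String.ofList (PySem.List.slice t none (some j) ++ PySem.List.pyRepeat ['1','1','0'] cnt ++
      PySem.List.slice t (some j) none)

-- ===== PRECONDITION & SPEC =====
def Spec_solution (s : List String) (out : List String) : Prop := out = solution_alt s
instance (s : List String) (out : List String) : Decidable (Spec_solution s out) := by unfold Spec_solution; infer_instance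

-- ===== CLAIM (what is proved, stated in full; the proofs are below) =====
def Claim_equal_solution : Prop := ∀ (s : List String), Dom_solution s → Spec_solution s (solution s)

-- ===== LEMMAS AND PROOFS =====

-- the stack-pop condition, as a Bool on the stack and incoming character
def popc (q : List Char) (ch : Char) : Bool := ch == '0' && List.isSuffixOf ['1','1'] q

theorem exists_concat2 (q : List Char) (h : 2 ≤ q.length) : ∃ r a b, q = r ++ [a, b] := by
  match hq : q.reverse with
  | [] => rw [← q.reverse_reverse, hq] at h; simp_all
  | [x] => rw [← q.reverse_reverse, hq] at h; simp_all
  | b :: a :: rr => exact ⟨rr.reverse, a, b, by rw [← List.reverse_reverse q, hq]; simp⟩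

theorem dropLast2_concat2 (r : List Char) (a b : Char) : (r ++ [a, b]).dropLast.dropLast = r := by
  have h : r ++ [a, b] = (r ++ [a]) ++ [b] := by simp
  rw [h, List.dropLast_concat, List.dropLast_concat]

theorem cond_iff (q : List Char) (ch : Char) :
    (q.length > 1 ∧ ch = '0' ∧ PySem.List.pyGet? q (-2) = some '1' ∧ PySem.List.pyGet? q (-1) = some '1')
    ↔ popc q ch = true := by
  simp only [popc, Bool.and_eq_true, beq_iff_eq, List.isSuffixOf_iff_suffix]
  constructor
  · rintro ⟨hl, hc, h2, h1⟩
    obtain ⟨r, a, b, rfl⟩ := exists_concat2 q (by omega)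
    have hb1 : b = '1' := by
      have e : r ++ [a, b] = (r ++ [a]) ++ [b] := by simp
      rw [e, PySem.List.pyGet?_neg_one_append_singleton] at h1
      simpa using h1
    have ha1 : a = '1' := by
      rw [PySem.List.pyGet?_neg_ofNat _ 2 (by omega) (by simp)] at h2
      simpa using h2
    exact ⟨hc, r, by rw [ha1, hb1]⟩
  · rintro ⟨hc, t, ht⟩
    obtain rfl : q = t ++ ['1','1'] := ht.symm
    refine ⟨by simp, hc, ?_, ?_⟩
    · rw [PySem.List.pyGet?_neg_ofNat _ 2 (by omega) (by simp)]
      simp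
    · have e : t ++ ['1','1'] = (t ++ ['1']) ++ ['1'] := by simp
      rw [e, PySem.List.pyGet?_neg_one_append_singleton]

theorem step_eq (q : List Char) (z c : Int) (ch : Char) :
    stepA (q, z, c) ch =
      if popc q ch then (q.dropLast.dropLast, z, c + 1)
      else (q ++ [ch], if ch = '0' then z + 1 else z, c) := by
  by_cases hb : popc q ch
  · rw [if_pos hb]; unfold stepA
    rw [if_pos ((cond_iff q ch).mpr hb)]
  · rw [if_neg hb]; unfold stepA
    rw [if_neg (fun hp => hb ((cond_iff q ch).mp hp))]

-- the reduced stack, as a function of the stack and remaining input alone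
def redQ : List Char → List Char → List Char
  | q, [] => q
  | q, ch :: l => if popc q ch then redQ q.dropLast.dropLast l else redQ (q ++ [ch]) l

theorem foldl_fst (l : List Char) (q : List Char) (z c : Int) :
    (l.foldl stepA (q, z, c)).1 = redQ q l := by
  induction l generalizing q z c with
  | nil => rfl
  | cons ch l ih =>
    rw [List.foldl_cons, step_eq, redQ]
    by_cases hb : popc q ch <;> simp [hb, ih]

theorem popc_suffix {q : List Char} {ch : Char} (h : popc q ch = true) :
    ch = '0' ∧ ∃ r, q = r ++ ['1','1'] := by
  simp only [popc, Bool.and_eq_true, beq_iff_eq, List.isSuffixOf_iff_suffix] at h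
  exact ⟨h.1, h.2.choose, h.2.choose_spec.symm⟩

theorem foldl_z (l : List Char) (q : List Char) (z c : Int) (hz : z = (q.count '0' : Int)) :
    (l.foldl stepA (q, z, c)).2.1 = (((l.foldl stepA (q, z, c)).1).count '0' : Int) := by
  induction l generalizing q z c with
  | nil => simpa using hz
  | cons ch l ih =>
    rw [List.foldl_cons, step_eq]
    by_cases hb : popc q ch
    · rw [if_pos hb]
      apply ih
      obtain ⟨hc, r, rfl⟩ := popc_suffix hb
      rw [dropLast2_concat2]
      simp [List.count_append] at hz
      simpa using hz
    · rw [if_neg hb]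
      apply ih
      by_cases hch : ch = '0' <;> simp [hch, hz, List.count_append]

theorem foldl_c (l : List Char) (q : List Char) (z c : Int) :
    3 * (l.foldl stepA (q, z, c)).2.2 + ((l.foldl stepA (q, z, c)).1.length : Int)
      = 3 * c + q.length + l.length := by
  induction l generalizing q z c with
  | nil => simp
  | cons ch l ih =>
    rw [List.foldl_cons, step_eq]
    by_cases hb : popc q ch
    · rw [if_pos hb]
      obtain ⟨hc, r, rfl⟩ := popc_suffix hb
      rw [dropLast2_concat2, ih]
      simp [List.length_append]
      ring
    · rw [if_neg hb, ih]
      simp [List.length_append]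
      ring

theorem redQ_append (q x y : List Char) : redQ q (x ++ y) = redQ (redQ q x) y := by
  induction x generalizing q with
  | nil => rfl
  | cons ch x ih =>
    rw [List.cons_append, redQ, redQ]
    by_cases hb : popc q ch <;> simp [hb, ih]

theorem redQ_110 (q y : List Char) : redQ q ('1' :: '1' :: '0' :: y) = redQ q y := by
  have h1 : ¬ popc q '1' = true := by simp [popc]
  have h2 : ¬ popc (q ++ ['1']) '1' = true := by simp [popc]
  have h3 : popc ((q ++ ['1']) ++ ['1']) '0' = true := by
    simp only [popc, Bool.and_eq_true, beq_iff_eq, List.isSuffixOf_iff_suffix]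
    exact ⟨trivial, ⟨q, by simp⟩⟩
  rw [redQ, if_neg h1, redQ, if_neg h2, redQ, if_pos h3]
  have e : (q ++ ['1']) ++ ['1'] = q ++ ['1','1'] := by simp
  rw [e, dropLast2_concat2]

theorem redQ_free (q l : List Char) (h : ¬ ['1','1','0'] <:+: q ++ l) : redQ q l = q ++ l := by
  induction l generalizing q with
  | nil => simp [redQ]
  | cons ch l ih =>
    rw [redQ]
    have hb : ¬ popc q ch = true := by
      intro hpc
      obtain ⟨hc, r, rfl⟩ := popc_suffix hpc
      exact h ⟨r, l, by subst hc; simp⟩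
    rw [if_neg hb, ih (q ++ [ch]) (by simpa using h)]
    simp

theorem loopB_eq_aux : ∀ n (t : List Char), t.length ≤ n → loopBGo n t = redQ [] t := by
  intro n
  induction n with
  | zero =>
    intro t ht
    have he : t = [] := by cases t <;> simp_all
    subst he
    rfl
  | succ n ih =>
    intro t ht
    show (if PySem.Chars.find t ['1','1','0'] = -1 then t
          else loopBGo n (PySem.List.slice t none (some (PySem.Chars.find t ['1','1','0'])) ++
                      PySem.List.slice t (some (PySem.Chars.find t ['1','1','0'] + 3)) none)) = redQ [] t
    by_cases h : PySem.Chars.find t ['1','1','0'] = -1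
    · rw [if_pos h, redQ_free [] t (by simpa using (PySem.Chars.find_eq_neg_one_iff t _).1 h)]
      simp
    · rw [if_neg h]
      have hinf : ['1','1','0'] <:+: t := (PySem.Chars.find_ne_neg_one_iff t ['1','1','0']).1 h
      have h0 : 0 ≤ PySem.Chars.find t ['1','1','0'] := (PySem.Chars.find_nonneg_iff t _).2 hinf
      have hle : PySem.Chars.find t ['1','1','0'] ≤ t.length := PySem.Chars.find_le_length t _
      obtain ⟨rest, hrest⟩ := (PySem.Chars.find_spec (s := t) (sub := ['1','1','0']) h0).1
      set i := PySem.Chars.find t ['1','1','0'] with hi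
      have htdec : t = t.take i.toNat ++ ('1' :: '1' :: '0' :: rest) := by
        conv_lhs => rw [← List.take_append_drop i.toNat t, ← hrest]
        rfl
      have hdrop3 : t.drop (i.toNat + 3) = rest := by
        have e1 : t.drop (i.toNat + 3) = (t.drop i.toNat).drop 3 := by
          rw [List.drop_drop]
        rw [e1, ← hrest]
        rfl
      have hlt : t.length = i.toNat + 3 + rest.length := by
        have := congrArg List.length htdec
        simp [List.length_append, List.length_take] at this
        omega
      rw [PySem.List.slice_to t h0, PySem.List.slice_from t (by omega)]
      have h3 : (i + 3).toNat = i.toNat + 3 := by omega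
      rw [h3, hdrop3]
      have hlen : (t.take i.toNat ++ rest).length ≤ n := by
        simp [List.length_append, List.length_take]
        omega
      rw [ih _ hlen]
      conv_rhs => rw [htdec]
      rw [redQ_append, redQ_append, redQ_110]

theorem loopB_eq (t : List Char) : loopB t = redQ [] t := loopB_eq_aux t.length t le_rfl

-- index just past the last '0'
def lz : List Char → Nat
  | [] => 0
  | a :: t => if lz t ≠ 0 then lz t + 1 else if a = '0' then 1 else 0

theorem prefix0_cons (a : Char) (l : List Char) : ['0'].isPrefixOf (a :: l) = ('0' == a) := by
  show ('0' == a && [].isPrefixOf l) = ('0' == a)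
  simp

theorem go_succ (t : List Char) (j : Nat) :
    PySem.Chars.rfind.go t ['0'] (j + 1) =
      (if ['0'].isPrefixOf (t.drop (j + 1)) then ((j : Int) + 1) else PySem.Chars.rfind.go t ['0'] j) := by
  rw [PySem.Chars.rfind.go]
  push_cast
  ring_nf

theorem go_zero (t : List Char) :
    PySem.Chars.rfind.go t ['0'] 0 = (if ['0'].isPrefixOf t then (0 : Int) else -1) := by
  rw [PySem.Chars.rfind.go]

theorem rfind_go_cons (a : Char) (t : List Char) (j : Nat) :
    PySem.Chars.rfind.go (a :: t) ['0'] (j + 1) =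
      (if PySem.Chars.rfind.go t ['0'] j = -1 then (if a = '0' then (0 : Int) else -1)
       else PySem.Chars.rfind.go t ['0'] j + 1) := by
  induction j with
  | zero =>
    rw [go_succ, go_zero]
    have e : (a :: t).drop (0 + 1) = t := by simp
    rw [e, go_zero, prefix0_cons]
    by_cases hp : ['0'].isPrefixOf t
    · rw [if_pos hp, if_pos hp, if_neg (by norm_num)]
      norm_num
    · rw [if_neg hp, if_neg hp, if_pos rfl]
      by_cases ha : a = '0'
      · subst ha; decide
      · rw [if_neg (fun hh : ('0' == a) = true => ha (beq_iff_eq.1 hh).symm), if_neg ha]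
  | succ j ihj =>
    rw [go_succ (a :: t) (j + 1)]
    have e : (a :: t).drop (j + 1 + 1) = t.drop (j + 1) := by simp
    rw [e, ihj, go_succ t j]
    by_cases hp : ['0'].isPrefixOf (t.drop (j + 1))
    · rw [if_pos hp, if_pos hp, if_neg (by omega)]
      push_cast
      ring
    · rw [if_neg hp, if_neg hp]

theorem rfind0_cons (a : Char) (t : List Char) :
    PySem.Chars.rfind (a :: t) ['0'] =
      (if PySem.Chars.rfind t ['0'] = -1 then (if a = '0' then (0 : Int) else -1)
       else PySem.Chars.rfind t ['0'] + 1) := by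
  show PySem.Chars.rfind.go (a :: t) ['0'] (t.length + 1) = _
  exact rfind_go_cons a t t.length

theorem rfind0_eq_lz (t : List Char) : PySem.Chars.rfind t ['0'] + 1 = (lz t : Int) := by
  induction t with
  | nil => norm_num [show PySem.Chars.rfind ([] : List Char) ['0'] = -1 from rfl, lz]
  | cons a t ih =>
    rw [rfind0_cons, lz]
    by_cases hr : PySem.Chars.rfind t ['0'] = -1
    · have hlz0 : lz t = 0 := by rw [hr] at ih; omega
      rw [if_pos hr, hlz0]
      by_cases ha : a = '0'
      · rw [if_pos ha]; norm_num [ha]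
      · rw [if_neg ha]; norm_num [ha]
    · have hlzne : lz t ≠ 0 := by omega
      rw [if_neg hr, if_pos hlzne]
      push_cast
      omega

-- B's insertion, recursively
def ins (c : Int) : List Char → List Char
  | [] => PySem.List.pyRepeat ['1','1','0'] c
  | a :: q => if lz (a :: q) ≠ 0 then a :: ins c q
              else PySem.List.pyRepeat ['1','1','0'] c ++ a :: q

theorem lz_eq_zero_iff (t : List Char) : lz t = 0 ↔ t.count '0' = 0 := by
  induction t with
  | nil => simp [lz]
  | cons a t ih =>
    rw [lz]
    by_cases h : lz t ≠ 0 <;> by_cases ha : a = '0' <;> (simp [h, ha, ih.symm]; try omega)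

theorem ins_eq_takedrop (c : Int) (t : List Char) :
    ins c t = t.take (lz t) ++ PySem.List.pyRepeat ['1','1','0'] c ++ t.drop (lz t) := by
  induction t with
  | nil => simp [ins, lz]
  | cons a q ih =>
    rw [ins]
    by_cases hq : lz q = 0
    · by_cases ha : a = '0'
      · have hl : lz (a :: q) = 1 := by rw [lz]; simp [hq, ha]
        rw [if_pos (by simp [hl]), hl, ih, hq]
        simp
      · have hl : lz (a :: q) = 0 := by rw [lz]; simp [hq, ha]
        rw [if_neg (by simp [hl]), hl]
        simp
    · have hl : lz (a :: q) = lz q + 1 := by rw [lz]; simp [hq]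
      rw [if_pos (by simp [hl]), hl, ih]
      simp

theorem rebuild_eq (q : List Char) (c : Int) :
    rebuildA q ((q.count '0' : Int)) c = ins c q := by
  induction q generalizing c with
  | nil =>
    by_cases hc : c = 0
    · simp [rebuildA, ins, hc, PySem.List.pyRepeat]
    · simp [rebuildA, ins, hc]
  | cons a q ih =>
    simp only [rebuildA]
    by_cases hz : (a :: q).count '0' = 0
    · have ha : a ≠ '0' := by
        intro hh; subst hh; simp at hz
      have hq : q.count '0' = 0 := by
        simp [ha] at hz; omega
      have hlzq : lz q = 0 := (lz_eq_zero_iff q).2 hq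
      have hlz : lz (a :: q) = 0 := by rw [lz]; simp [hlzq, ha]
      have hinq0 : ins 0 q = q := by
        rw [ins_eq_takedrop, hlzq]
        simp [PySem.List.pyRepeat]
      have hins : ins c (a :: q) = PySem.List.pyRepeat ['1','1','0'] c ++ a :: q := by
        rw [ins, if_neg (by simp [hlz])]
      have hccz : ((a :: q).count '0' : Int) = 0 := by exact_mod_cast hz
      have hqz : ((a :: q).count '0' : Int) = ((q.count '0') : Int) := by rw [hz, hq]
      rw [hins, if_neg ha, hqz, ih]
      by_cases hcz : c = 0
      · subst hcz
        have hcond : ¬ (((q.count '0') : Int) = 0 ∧ (0 : Int) ≠ 0) := by simp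
        rw [if_neg hcond, if_neg hcond, hinq0]
        simp [PySem.List.pyRepeat]
      · have hcond : (((q.count '0') : Int) = 0 ∧ c ≠ 0) := ⟨by exact_mod_cast hq, hcz⟩
        rw [if_pos hcond, if_pos hcond, hinq0]
    · have hlz : lz (a :: q) ≠ 0 := fun hh => hz ((lz_eq_zero_iff _).1 hh)
      have hins : ins c (a :: q) = a :: ins c q := by
        rw [ins, if_pos (by simp [hlz])]
      have hcond : ¬ (((a :: q).count '0' : Int) = 0 ∧ c ≠ 0) := by
        intro hh; exact hz (by exact_mod_cast hh.1)
      rw [hins, if_neg hcond, if_neg hcond]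
      have hz' : (if a = '0' then ((a :: q).count '0' : Int) - 1 else ((a :: q).count '0' : Int))
          = (q.count '0' : Int) := by
        by_cases ha : a = '0' <;> simp [ha]
      rw [hz', ih c]
      simp

theorem lists_eq (l : List Char) :
    rebuildA (l.foldl stepA ([], 0, 0)).1 (l.foldl stepA ([], 0, 0)).2.1 (l.foldl stepA ([], 0, 0)).2.2 =
      PySem.List.slice (loopB l) none (some (PySem.Chars.rfind (loopB l) ['0'] + 1)) ++
      PySem.List.pyRepeat ['1','1','0'] (PySem.Int.floordiv ((l.length : Int) - ((loopB l).length : Int)) 3) ++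
      PySem.List.slice (loopB l) (some (PySem.Chars.rfind (loopB l) ['0'] + 1)) none := by
  have hfst := foldl_fst l [] 0 0
  have hz := foldl_z l [] 0 0 (by simp)
  have hc := foldl_c l [] 0 0
  have hloop := loopB_eq l
  set t0 := redQ [] l with ht0
  rw [hloop]
  have hj : PySem.Chars.rfind t0 ['0'] + 1 = (lz t0 : Int) := rfind0_eq_lz t0
  have hj0 : 0 ≤ PySem.Chars.rfind t0 ['0'] + 1 := by rw [hj]; exact Int.natCast_nonneg _
  rw [PySem.List.slice_to t0 hj0, PySem.List.slice_from t0 hj0, hj, Int.toNat_natCast]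
  have hcnt : PySem.Int.floordiv ((l.length : Int) - (t0.length : Int)) 3
      = (l.foldl stepA ([], 0, 0)).2.2 := by
    have hd : (l.length : Int) - (t0.length : Int) = 3 * (l.foldl stepA ([], 0, 0)).2.2 := by
      rw [hfst] at hc
      simp at hc
      omega
    rw [hd, PySem.Int.floordiv_eq_ediv_of_pos (by norm_num)]
    exact Int.mul_ediv_cancel_left _ (by norm_num)
  rw [hcnt, hz, hfst]
  rw [rebuild_eq t0 ((l.foldl stepA ([], 0, 0)).2.2), ins_eq_takedrop]

-- ===== VERDICT (by name: the statement is the Claim_ definition above) =====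
theorem solution_spec : Claim_equal_solution := by
  intro s _
  unfold Spec_solution solution solution_alt
  exact List.map_congr_left fun cur _ => congrArg String.ofList (lists_eq cur.toList)
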